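-- pv_equiv track=rewrite | github.com/VitorBordignon/python-study | chapter-7/reg-exp.py | is_phone_string
-- ===== SOURCE A (Python) =====
-- def is_phone_string(value):
--     # check the length of the value
--     if len(value) != 12:
--         return False
--
--     for i in range(0, 3):
--         if not value[i].isdecimal():
--             return False
--
--     if value[3] != "-":
--         return False
--
--     for i in range(4, 7):
--         if not value[i].isdecimal():
--             return False
--
--     if value[7] != "-":
--         return False
--
--     for i in range(8, 12):
--         if not value[i].isdecimal():
--             return False
--
--     return True
-- ===== SOURCE B (Python) =====
-- def is_phone_string(value):
--     parts = value.split('-')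
--     return [len(p) for p in parts] == [3, 3, 4] and all(p.isdecimal() for p in parts)
-- ===== Notes on version B (the rewrite author's own statement) =====
-- stated objective: simpler
-- what changed: Instead of indexing fixed positions (length check, three index-range loops, two dash checks), B splits the string at the dash separator and validates the three resulting parts: lengths [3,3,4] and each part isdecimal; the length-12 and dash-position requirements are implied.
import Mathlib
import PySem

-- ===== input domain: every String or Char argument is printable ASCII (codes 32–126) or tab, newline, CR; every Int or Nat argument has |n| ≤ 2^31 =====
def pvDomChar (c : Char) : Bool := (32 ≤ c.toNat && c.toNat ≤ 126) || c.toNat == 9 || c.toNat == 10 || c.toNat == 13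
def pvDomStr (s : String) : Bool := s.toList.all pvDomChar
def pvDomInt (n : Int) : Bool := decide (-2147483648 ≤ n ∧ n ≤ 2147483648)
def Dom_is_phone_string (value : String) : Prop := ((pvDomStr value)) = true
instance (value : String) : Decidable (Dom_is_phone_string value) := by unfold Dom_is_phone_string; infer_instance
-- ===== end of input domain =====

-- B replaces A's positional index checks with splitting the string at the dash and
-- validating the three parts (lengths 3,3,4 and all-decimal); objective: simpler.


-- ===== PORT A =====
-- literal port of A: length check, three index-range loops (each early-return loop
-- transcribed as `.all` over the same pyRange) and two positional dash checks.
-- `.isdecimal()` is ported as PySem.Chars.isdigit, exact on the ASCII domain.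
def is_phone_string (value : String) : Bool :=
  let s := value.toList
  if s.length ≠ 12 then false
  else if ¬ ((PySem.List.pyRange 0 3 1).all fun i =>
      ((PySem.List.pyGet? s i).map PySem.Chars.isdigit).getD false) then false
  else if PySem.List.pyGet? s 3 ≠ some '-' then false
  else if ¬ ((PySem.List.pyRange 4 7 1).all fun i =>
      ((PySem.List.pyGet? s i).map PySem.Chars.isdigit).getD false) then false
  else if PySem.List.pyGet? s 7 ≠ some '-' then false
  else if ¬ ((PySem.List.pyRange 8 12 1).all fun i =>
      ((PySem.List.pyGet? s i).map PySem.Chars.isdigit).getD false) then false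
  else true

-- ===== PORT B =====
-- literal port of Source B: split on '-', compare the part lengths with [3, 3, 4], then
-- check each part.isdecimal() (ported as PySem.Chars.strIsdigit, exact on ASCII).
def is_phone_string_alt (value : String) : Bool :=
  let parts := PySem.Chars.splitOn value.toList ['-']
  decide (parts.map List.length = [3, 3, 4]) &&
    parts.all (fun p => PySem.Chars.strIsdigit p)

-- ===== PRECONDITION & SPEC =====
def Spec_is_phone_string (value : String) (out : Bool) : Prop := out = is_phone_string_alt value
instance (value : String) (out : Bool) : Decidable (Spec_is_phone_string value out) := by unfold Spec_is_phone_string; infer_instance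

-- ===== CLAIM (what is proved, stated in full; the proofs are below) =====
def Claim_equal_is_phone_string : Prop := ∀ (value : String), Dom_is_phone_string value → Spec_is_phone_string value (is_phone_string value)

-- ===== LEMMAS AND PROOFS =====
-- pvSplit/pvJoin: proof-side model of Python's split on the single character '-'
-- and of rejoining the parts; pvShape: the shape both ports are shown equivalent to.
def pvSplit (pre : List Char) : List Char → List (List Char)
  | [] => [pre]
  | c :: rest => if c = '-' then pre :: pvSplit [] rest else pvSplit (pre ++ [c]) rest

def pvJoin : List (List Char) → List Char
  | [] => []
  | [p] => p
  | p :: q :: rest => p ++ '-' :: pvJoin (q :: rest)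

theorem pv_go_spec : ∀ (fuel : Nat) (l cur : List Char) (acc : List (List Char)), l.length < fuel →
    PySem.Chars.splitOn.go ['-'] fuel l cur acc = acc.reverse ++ pvSplit cur.reverse l := by
  intro fuel
  induction fuel with
  | zero => intro l cur acc h; omega
  | succ n ih =>
    intro l cur acc h
    cases l with
    | nil => rw [PySem.Chars.splitOn.go.eq_def]; simp [pvSplit]
    | cons c rest =>
      rw [PySem.Chars.splitOn.go.eq_def]
      simp only
      by_cases hc : c = '-'
      · subst hc
        have hp : List.isPrefixOf ['-'] ('-' :: rest) = true := by simp [List.isPrefixOf]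
        rw [if_pos hp]
        rw [ih _ _ _ (by simp at h ⊢; omega)]
        simp [pvSplit]
      · have hp : List.isPrefixOf ['-'] (c :: rest) = false := by
          simp [List.isPrefixOf]; exact fun hh => absurd hh.symm hc
        rw [hp]
        simp only [Bool.false_eq_true, if_false]
        rw [ih _ _ _ (by simp at h ⊢; omega)]
        simp [pvSplit, hc]

theorem pv_splitOn_eq (s : List Char) :
    PySem.Chars.splitOn s ['-'] = pvSplit [] s := by
  rw [PySem.Chars.splitOn, pv_go_spec _ _ _ _ (by omega)]
  rfl

theorem pvSplit_ne (l : List Char) : ∀ pre, pvSplit pre l ≠ [] := by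
  induction l with
  | nil => intro pre; simp [pvSplit]
  | cons c rest ih =>
    intro pre
    by_cases hc : c = '-' <;> simp [pvSplit, hc, ih]

theorem pv_join (l : List Char) : ∀ pre, pvJoin (pvSplit pre l) = pre ++ l := by
  induction l with
  | nil => intro pre; simp [pvSplit, pvJoin]
  | cons c rest ih =>
    intro pre
    by_cases hc : c = '-'
    · subst hc
      simp only [pvSplit]
      cases hres : pvSplit ([] : List Char) rest with
      | nil => exact absurd hres (pvSplit_ne rest [])
      | cons q qs =>
        simp only [if_true]
        rw [pvJoin, ← hres, ih]
        simp
    · simp only [pvSplit, if_neg hc]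
      rw [ih]; simp

def pvShape (value : String) : Prop :=
  ∃ a b c d e f g h i j : Char, value.toList = [a, b, c, '-', d, e, f, '-', g, h, i, j] ∧
    (PySem.Chars.isdigit a ∧ PySem.Chars.isdigit b ∧ PySem.Chars.isdigit c ∧
     PySem.Chars.isdigit d ∧ PySem.Chars.isdigit e ∧ PySem.Chars.isdigit f ∧
     PySem.Chars.isdigit g ∧ PySem.Chars.isdigit h ∧ PySem.Chars.isdigit i ∧
     PySem.Chars.isdigit j)

theorem pv_ne_dash {x : Char} (hx : PySem.Chars.isdigit x = true) : ¬ (x = '-') := by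
  rintro rfl; exact absurd hx (by decide)

theorem pv_len3 (p : List Char) (h : p.length = 3) : ∃ a b c, p = [a, b, c] := by
  rcases p with _|⟨a,_|⟨b,_|⟨c,_|_⟩⟩⟩ <;> simp_all

theorem pv_len4 (p : List Char) (h : p.length = 4) : ∃ a b c d, p = [a, b, c, d] := by
  rcases p with _|⟨a,_|⟨b,_|⟨c,_|⟨d,_|_⟩⟩⟩⟩ <;> simp_all

theorem pv_B_char (value : String) : is_phone_string_alt value = true ↔ pvShape value := by
  constructor
  · intro hB
    simp only [is_phone_string_alt, Bool.and_eq_true, decide_eq_true_eq, List.all_eq_true,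
      pv_splitOn_eq] at hB
    obtain ⟨hlen, hdig⟩ := hB
    have hjoin := pv_join value.toList []
    rcases hq : pvSplit [] value.toList with _|⟨p1,_|⟨p2,_|⟨p3,_|⟨p4,ps⟩⟩⟩⟩ <;>
      rw [hq] at hlen <;> simp at hlen
    obtain ⟨h1, h2, h3⟩ := hlen
    obtain ⟨a, b, c, rfl⟩ := pv_len3 p1 h1
    obtain ⟨d, e, f, rfl⟩ := pv_len3 p2 h2
    obtain ⟨g, h, i, j, rfl⟩ := pv_len4 p3 h3
    rw [hq] at hjoin hdig
    have hd1 := hdig _ (by simp : [a,b,c] ∈ [[a,b,c],[d,e,f],[g,h,i,j]])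
    have hd2 := hdig _ (by simp : [d,e,f] ∈ [[a,b,c],[d,e,f],[g,h,i,j]])
    have hd3 := hdig _ (by simp : [g,h,i,j] ∈ [[a,b,c],[d,e,f],[g,h,i,j]])
    simp [PySem.Chars.strIsdigit] at hd1 hd2 hd3
    refine ⟨a, b, c, d, e, f, g, h, i, j, ?_, ?_⟩
    · simp only [List.nil_append] at hjoin
      rw [← hjoin]; simp [pvJoin]
    · tauto
  · rintro ⟨a, b, c, d, e, f, g, h, i, j, hl, hd⟩
    obtain ⟨d1,d2,d3,d4,d5,d6,d7,d8,d9,d10⟩ := hd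
    simp only [is_phone_string_alt, pv_splitOn_eq, hl]
    rw [show pvSplit [] [a, b, c, '-', d, e, f, '-', g, h, i, j] = [[a,b,c],[d,e,f],[g,h,i,j]] from by
      simp [pvSplit, pv_ne_dash d1, pv_ne_dash d2, pv_ne_dash d3, pv_ne_dash d4, pv_ne_dash d5,
        pv_ne_dash d6, pv_ne_dash d7, pv_ne_dash d8, pv_ne_dash d9, pv_ne_dash d10]]
    simp [PySem.Chars.strIsdigit, d1, d2, d3, d4, d5, d6, d7, d8, d9, d10]

theorem pv_exists12 (s : List Char) (h : s.length = 12) :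
    ∃ a b c d e f g h' i j k l, s = [a,b,c,d,e,f,g,h',i,j,k,l] := by
  rcases s with _|⟨a,_|⟨b,_|⟨c,_|⟨d,_|⟨e,_|⟨f,_|⟨g,_|⟨h',_|⟨i,_|⟨j,_|⟨k,_|⟨l,t⟩⟩⟩⟩⟩⟩⟩⟩⟩⟩⟩⟩ <;>
    first
      | (exact ⟨a,b,c,d,e,f,g,h',i,j,k,l, by simp_all⟩)
      | (exfalso; simp at h)

theorem pv_A_char (value : String) : is_phone_string value = true ↔ pvShape value := by
  constructor
  · intro hA
    have h12 : value.toList.length = 12 := by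
      by_contra hne
      have hne' : ¬ (value.length = 12) := by simpa using hne
      simp [is_phone_string, hne'] at hA
    obtain ⟨a,b,c,d,e,f,g,h',i,j,k,l,hl⟩ := pv_exists12 value.toList h12
    simp only [is_phone_string, hl] at hA
    have h1 : PySem.List.pyRange 0 3 1 = [0,1,2] := by decide
    have h2 : PySem.List.pyRange 4 7 1 = [4,5,6] := by decide
    have h3 : PySem.List.pyRange 8 12 1 = [8,9,10,11] := by decide
    simp only [h1, h2, h3, List.all_cons, List.all_nil] at hA
    norm_num [PySem.List.pyGet?, PySem.List.pyIdx?] at hA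
    simp only [show ((2:Int).toNat) = 2 from rfl, show ((3:Int).toNat) = 3 from rfl,
      show ((4:Int).toNat) = 4 from rfl, show ((5:Int).toNat) = 5 from rfl,
      show ((6:Int).toNat) = 6 from rfl, show ((7:Int).toNat) = 7 from rfl,
      show ((8:Int).toNat) = 8 from rfl, show ((9:Int).toNat) = 9 from rfl,
      show ((10:Int).toNat) = 10 from rfl, show ((11:Int).toNat) = 11 from rfl,
      List.getElem_cons_zero, List.getElem_cons_succ] at hA
    obtain ⟨⟨x1, x2, x3⟩, ha, ⟨x4, x5, x6⟩, hb, x7, x8, x9, x10⟩ := hA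
    subst ha hb
    exact ⟨a, b, c, e, f, g, i, j, k, l, hl, x1, x2, x3, x4, x5, x6, x7, x8, x9, x10⟩
  · rintro ⟨a, b, c, d, e, f, g, h, i, j, hl, x1, x2, x3, x4, x5, x6, x7, x8, x9, x10⟩
    have h1 : PySem.List.pyRange 0 3 1 = [0,1,2] := by decide
    have h2 : PySem.List.pyRange 4 7 1 = [4,5,6] := by decide
    have h3 : PySem.List.pyRange 8 12 1 = [8,9,10,11] := by decide
    simp only [is_phone_string, hl, h1, h2, h3, List.all_cons, List.all_nil]
    norm_num [PySem.List.pyGet?, PySem.List.pyIdx?]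
    simp only [show ((2:Int).toNat) = 2 from rfl, show ((3:Int).toNat) = 3 from rfl,
      show ((4:Int).toNat) = 4 from rfl, show ((5:Int).toNat) = 5 from rfl,
      show ((6:Int).toNat) = 6 from rfl, show ((7:Int).toNat) = 7 from rfl,
      show ((8:Int).toNat) = 8 from rfl, show ((9:Int).toNat) = 9 from rfl,
      show ((10:Int).toNat) = 10 from rfl, show ((11:Int).toNat) = 11 from rfl,
      List.getElem_cons_zero, List.getElem_cons_succ]
    simp [x1, x2, x3, x4, x5, x6, x7, x8, x9, x10]

-- ===== VERDICT (by name: the statement is the Claim_ definition above) =====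
theorem is_phone_string_spec : Claim_equal_is_phone_string := by
  intro value _
  show is_phone_string value = is_phone_string_alt value
  have h := (pv_A_char value).trans (pv_B_char value).symm
  cases ha : is_phone_string value <;> cases hb : is_phone_string_alt value <;> simp_all
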